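-- pv_equiv track=rewrite | github.com/KevinZhu223/Resume-Tailor | resume_tailor.py | _apply_skill_hierarchy_enhanced
-- ===== SOURCE A (Python) =====
-- from typing import List, Tuple, Optional, Dict, Set, Any
--
-- def _apply_skill_hierarchy_enhanced(skills: List[str]) -> List[str]:
--     """Enhanced n-gram merging with lemmatization and skill hierarchy"""
--     if not skills:
--         return []
--
--     # Sort skills by length (longer first) to prioritize more specific terms
--     sorted_skills = sorted(skills, key=len, reverse=True)
--
--     # Track seen skills (case-insensitive)
--     seen_lower = set()
--     merged_skills = []
--
--     for skill in sorted_skills: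
--         skill_lower = skill.lower()
--
--         # Check if this skill is already covered by a longer one
--         is_covered = False
--         for seen_skill in seen_lower:
--             if skill_lower in seen_skill and len(skill_lower) < len(seen_skill):
--                 is_covered = True
--                 break
--
--         if not is_covered:
--             # Check if any existing skill should be replaced by this longer one
--             merged_skills = [
--                 s for s in merged_skills
--                 if not (s.lower() in skill_lower and len(s.lower()) < len(skill_lower))
--             ]
--             merged_skills.append(skill)
--             seen_lower.add(skill_lower)
--
--     return merged_skills
-- ===== SOURCE B (Python) =====
-- from typing import List
--
-- def _apply_skill_hierarchy_enhanced(skills: List[str]) -> List[str]: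
--     """Keep a skill iff its lowercase form is not a proper substring of any
--     earlier (longer-or-equal) skill in the length-sorted order: one stateless
--     comprehension over the sorted list, no seen-set and no re-filtering pass."""
--     ordered = sorted(skills, key=len, reverse=True)
--     lows = [s.lower() for s in ordered]
--     return [s for i, s in enumerate(ordered)
--             if not any(len(s) < len(t) and s.lower() in t for t in lows[:i])]
-- ===== Notes on version B (the rewrite author's own statement) =====
-- stated objective: alternative
-- what changed: A's stateful loop (seen-set membership scan plus a re-filtering pass over the merged list on every kept skill) is replaced by one stateless comprehension over the length-sorted list that keeps a skill iff its lowercase form is not a proper substring of any earlier (longer-or-equal) element; correctness rests on substring-transitivity, the re-filtering pass is dropped entirely because it can never remove anything in descending length order.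
import Mathlib
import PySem

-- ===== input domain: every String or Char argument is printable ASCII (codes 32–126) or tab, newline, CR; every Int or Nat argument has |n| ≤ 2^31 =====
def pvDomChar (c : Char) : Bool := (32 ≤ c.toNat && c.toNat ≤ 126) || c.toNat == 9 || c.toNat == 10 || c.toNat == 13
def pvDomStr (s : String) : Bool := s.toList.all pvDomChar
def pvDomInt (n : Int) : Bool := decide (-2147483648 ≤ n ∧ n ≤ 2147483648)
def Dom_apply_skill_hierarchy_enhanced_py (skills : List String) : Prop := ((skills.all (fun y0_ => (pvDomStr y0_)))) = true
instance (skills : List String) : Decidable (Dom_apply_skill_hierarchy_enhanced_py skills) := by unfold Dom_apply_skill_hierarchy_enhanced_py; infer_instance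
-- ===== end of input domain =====

-- B replaces A's seen-set/merged-list loop (with its re-filtering pass) by one stateless
-- comprehension over the length-sorted list; alternative decomposition, same asymptotic cost.

-- ===== PORT A =====
-- loop body of A's 'for skill in sorted_skills' (state = (seen_lower, merged_skills))
def pvStepA (st : PySem.Set String × List String) (skill : String) : PySem.Set String × List String :=
  let skill_lower := PySem.Str.lower skill
  -- 'for seen_skill in seen_lower: … break' only establishes existence, which is
  -- independent of the set's iteration order: ported as .any
  let is_covered := st.1.any (fun seen_skill =>
    PySem.Str.isIn skill_lower seen_skill &&
    decide (PySem.Str.len skill_lower < PySem.Str.len seen_skill))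
  if is_covered then st
  else
    let merged := st.2.filter (fun s =>
      !(PySem.Str.isIn (PySem.Str.lower s) skill_lower &&
        decide (PySem.Str.len (PySem.Str.lower s) < PySem.Str.len skill_lower)))
    (PySem.Set.add st.1 skill_lower, merged ++ [skill])

def apply_skill_hierarchy_enhanced_py (skills : List String) : List String :=
  if skills = [] then []
  else
    let sorted_skills := PySem.List.sorted skills (fun s => PySem.Str.len s) true
    (sorted_skills.foldl pvStepA (PySem.Set.empty, [])).2

-- ===== PORT B =====
def apply_skill_hierarchy_enhanced_py_alt (skills : List String) : List String :=
  let ordered := PySem.List.sorted skills (fun s => PySem.Str.len s) true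
  let lows := ordered.map PySem.Str.lower
  ((PySem.List.enumerate ordered).filter (fun p =>
      !((PySem.List.slice lows none (some p.1)).any (fun t =>
          decide (PySem.Str.len p.2 < PySem.Str.len t) && PySem.Str.isIn (PySem.Str.lower p.2) t)))).map
    (fun p => p.2)

-- ===== PRECONDITION & SPEC =====
def Spec_apply_skill_hierarchy_enhanced_py (skills : List String) (out : List String) : Prop := out = apply_skill_hierarchy_enhanced_py_alt skills
instance (skills : List String) (out : List String) : Decidable (Spec_apply_skill_hierarchy_enhanced_py skills out) := by unfold Spec_apply_skill_hierarchy_enhanced_py; infer_instance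

-- ===== CLAIM (what is proved, stated in full; the proofs are below) =====
def Claim_equal_apply_skill_hierarchy_enhanced_py : Prop := ∀ (skills : List String), Dom_apply_skill_hierarchy_enhanced_py skills → Spec_apply_skill_hierarchy_enhanced_py skills (apply_skill_hierarchy_enhanced_py skills)

-- ===== LEMMAS AND PROOFS =====

-- B's per-element test: x (original case) is properly covered by the lowered string t
def pvCondB (x t : String) : Bool :=
  decide (PySem.Str.len x < PySem.Str.len t) && PySem.Str.isIn (PySem.Str.lower x) t

-- the same relation between two already-lowered strings
def pvCond2 (t z : String) : Bool :=
  decide (PySem.Str.len t < PySem.Str.len z) && PySem.Str.isIn t z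

-- reference recursion, A-shaped: kept = lowered forms of the skills kept so far
def pvKeepKept (kept : List String) : List String → List String
  | [] => []
  | x :: xs =>
    if kept.any (pvCondB x) then pvKeepKept kept xs
    else x :: pvKeepKept (kept ++ [PySem.Str.lower x]) xs

-- reference recursion, B-shaped: earlier = lowered forms of ALL earlier skills
def pvKeepAll (earlier : List String) : List String → List String
  | [] => []
  | x :: xs =>
    (if earlier.any (pvCondB x) then [] else [x]) ++ pvKeepAll (earlier ++ [PySem.Str.lower x]) xs

lemma pv_len_lower_chars (cs : List Char) : (PySem.Chars.lower cs).length = cs.length := by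
  simp [PySem.Chars.lower]

-- A's covered-test against a lowered seen string equals pvCondB
lemma pv_condA_eq (x t : String) :
    (PySem.Str.isIn (PySem.Str.lower x) t &&
      decide (PySem.Str.len (PySem.Str.lower x) < PySem.Str.len t)) = pvCondB x t := by
  simp [pvCondB, pv_len_lower_chars, Bool.and_comm]

lemma pv_cond2_lower (x z : String) : pvCond2 (PySem.Str.lower x) z = pvCondB x z := by
  simp [pvCond2, pvCondB, pv_len_lower_chars]

lemma pv_trans {x t z : String} (h1 : pvCondB x t = true) (h2 : pvCond2 t z = true) :
    pvCondB x z = true := by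
  simp only [pvCondB, pvCond2, Bool.and_eq_true, decide_eq_true_eq,
    PySem.Str.isIn_iff_infix] at *
  exact ⟨h1.1.trans h2.1, h1.2.trans h2.2⟩

lemma pv_kk_ka : ∀ (l kept earlier : List String),
    (∀ t ∈ kept, t ∈ earlier) →
    (∀ t ∈ earlier, t ∈ kept ∨ ∃ z ∈ kept, pvCond2 t z = true) →
    pvKeepKept kept l = pvKeepAll earlier l
  | [], _, _, _, _ => rfl
  | x :: xs, kept, earlier, hsub, hcov => by
    have hany : kept.any (pvCondB x) = earlier.any (pvCondB x) := by
      rw [Bool.eq_iff_iff]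
      simp only [List.any_eq_true]
      constructor
      · rintro ⟨t, ht, hc⟩; exact ⟨t, hsub t ht, hc⟩
      · rintro ⟨t, ht, hc⟩
        rcases hcov t ht with h | ⟨z, hz, h2⟩
        · exact ⟨t, h, hc⟩
        · exact ⟨z, hz, pv_trans hc h2⟩
    simp only [pvKeepKept, pvKeepAll, hany]
    by_cases hc : earlier.any (pvCondB x) = true
    · simp only [hc, if_pos, List.nil_append]
      apply pv_kk_ka xs kept (earlier ++ [PySem.Str.lower x])
      · intro t ht; exact List.mem_append_left _ (hsub t ht)
      · intro t ht
        rcases List.mem_append.mp ht with h | h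
        · exact hcov t h
        · simp only [List.mem_singleton] at h
          subst h
          rcases List.any_eq_true.mp hc with ⟨z, hz1, hz2⟩
          rcases hcov z hz1 with hzk | ⟨w, hw, hw2⟩
          · right; exact ⟨z, hzk, (pv_cond2_lower x z).symm ▸ hz2⟩
          · right; exact ⟨w, hw, (pv_cond2_lower x w).symm ▸ pv_trans hz2 hw2⟩
    · simp only [Bool.not_eq_true] at hc
      simp only [hc, Bool.false_eq_true, if_false, List.singleton_append]
      congr 1
      apply pv_kk_ka xs (kept ++ [PySem.Str.lower x]) (earlier ++ [PySem.Str.lower x])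
      · intro t ht
        rcases List.mem_append.mp ht with h | h
        · exact List.mem_append_left _ (hsub t h)
        · exact List.mem_append_right _ h
      · intro t ht
        rcases List.mem_append.mp ht with h | h
        · rcases hcov t h with h1 | ⟨z, hz, h2⟩
          · exact Or.inl (List.mem_append_left _ h1)
          · exact Or.inr ⟨z, List.mem_append_left _ hz, h2⟩
        · exact Or.inl (List.mem_append_right _ h)

-- A's fold, under the sortedness invariant, is pvKeepKept
lemma pv_foldA : ∀ (l : List String) (seen : PySem.Set String) (merged : List String),
    l.Pairwise (fun a b => PySem.Str.len b ≤ PySem.Str.len a) →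
    (∀ t, t ∈ seen ↔ t ∈ merged.map PySem.Str.lower) →
    (∀ s ∈ merged, ∀ x ∈ l, PySem.Str.len x ≤ PySem.Str.len s) →
    (l.foldl pvStepA (seen, merged)).2 = merged ++ pvKeepKept (merged.map PySem.Str.lower) l
  | [], seen, merged, _, _, _ => by simp [pvKeepKept]
  | x :: xs, seen, merged, hp, hseen, hlen => by
    rcases List.pairwise_cons.mp hp with ⟨hx, hp'⟩
    have hany : seen.any (fun t =>
        PySem.Str.isIn (PySem.Str.lower x) t &&
          decide (PySem.Str.len (PySem.Str.lower x) < PySem.Str.len t))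
        = (merged.map PySem.Str.lower).any (pvCondB x) := by
      rw [Bool.eq_iff_iff]
      simp only [List.any_eq_true, pv_condA_eq]
      constructor
      · rintro ⟨t, ht, h⟩; exact ⟨t, (hseen t).mp ht, h⟩
      · rintro ⟨t, ht, h⟩; exact ⟨t, (hseen t).mpr ht, h⟩
    simp only [List.foldl_cons]
    by_cases hc : (merged.map PySem.Str.lower).any (pvCondB x) = true
    · have hstep : pvStepA (seen, merged) x = (seen, merged) := by
        simp only [pvStepA, hany, hc, if_pos]
      rw [hstep, pv_foldA xs seen merged hp' hseen
        (fun s hs y hy => hlen s hs y (List.mem_cons_of_mem _ hy))]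
      simp only [pvKeepKept, hc, if_pos]
    · simp only [Bool.not_eq_true] at hc
      have hfilter : merged.filter (fun s =>
          !(PySem.Str.isIn (PySem.Str.lower s) (PySem.Str.lower x) &&
            decide (PySem.Str.len (PySem.Str.lower s) < PySem.Str.len (PySem.Str.lower x)))) = merged := by
        rw [List.filter_eq_self]
        intro s hs
        have h1 : PySem.Str.len x ≤ PySem.Str.len s := hlen s hs x List.mem_cons_self
        have h1' : x.toList.length ≤ s.toList.length := by
          simpa [PySem.Str.len_eq] using h1
        have h1'' : x.length <= s.length := by simpa using h1'
        simp [pv_len_lower_chars, h1'']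
      have hstep : pvStepA (seen, merged) x
          = (PySem.Set.add seen (PySem.Str.lower x), merged ++ [x]) := by
        simp only [pvStepA, hany, hc, Bool.false_eq_true, if_false, hfilter]
      rw [hstep, pv_foldA xs (PySem.Set.add seen (PySem.Str.lower x)) (merged ++ [x]) hp'
        (by
          intro t
          rw [PySem.Set.mem_add, hseen t]
          simp [or_comm])
        (by
          intro s hs y hy
          rcases List.mem_append.mp hs with h | h
          · exact hlen s h y (List.mem_cons_of_mem _ hy)
          · simp only [List.mem_singleton] at h; subst h; exact hx y hy)]
      simp only [pvKeepKept, hc, Bool.false_eq_true, if_false, List.map_append]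
      simp

-- B's enumerate/slice comprehension is pvKeepAll
lemma pv_foldB (ordered : List String) : ∀ (rest : List String) (k : Nat),
    rest = ordered.drop k →
    ((PySem.List.enumerate rest (k : Int)).filter (fun p =>
        !((PySem.List.slice (ordered.map PySem.Str.lower) none (some p.1)).any (fun t =>
            decide (PySem.Str.len p.2 < PySem.Str.len t) &&
              PySem.Str.isIn (PySem.Str.lower p.2) t)))).map (fun p => p.2)
      = pvKeepAll ((ordered.take k).map PySem.Str.lower) rest
  | [], k, _ => by simp [PySem.List.enumerate, pvKeepAll]
  | x :: xs, k, h => by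
    have hk : k < ordered.length := by
      by_contra hh
      push Not at hh
      rw [List.drop_eq_nil_of_le hh] at h
      exact List.cons_ne_nil x xs h
    have hdrop := List.getElem_cons_drop (as := ordered) (i := k) hk
    rw [← hdrop] at h
    obtain ⟨hx, hxs⟩ : ordered[k] = x ∧ xs = ordered.drop (k + 1) := by
      injection h.symm with h1 h2; exact ⟨h1, h2.symm⟩
    have htake : (ordered.take (k + 1)).map PySem.Str.lower
        = (ordered.take k).map PySem.Str.lower ++ [PySem.Str.lower x] := by
      rw [List.take_add_one, List.getElem?_eq_getElem hk, hx]
      simp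
    have hslice : PySem.List.slice (ordered.map PySem.Str.lower) none (some ((k : Nat) : Int))
        = (ordered.take k).map PySem.Str.lower := by
      rw [PySem.List.slice_to_natCast]
      exact (List.map_take ..).symm
    have hcast : (k : Int) + 1 = ((k + 1 : Nat) : Int) := by push_cast; ring
    have hhead : (!((PySem.List.slice (ordered.map PySem.Str.lower) none (some ((k : Nat) : Int))).any
        (fun t => decide (PySem.Str.len x < PySem.Str.len t) &&
          PySem.Str.isIn (PySem.Str.lower x) t)))
        = !(((ordered.take k).map PySem.Str.lower).any (pvCondB x)) := by
      rw [hslice]; rfl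
    rw [PySem.List.enumerate_cons, List.filter_cons]
    simp only [hhead, hcast]
    by_cases hc : (((ordered.take k).map PySem.Str.lower).any (pvCondB x)) = true
    · simp only [hc, Bool.not_true, Bool.false_eq_true, if_false]
      simp only [pvKeepAll, hc, if_pos, List.nil_append, ← htake]
      exact pv_foldB ordered xs (k + 1) hxs
    · simp only [Bool.not_eq_true] at hc
      simp only [hc, Bool.not_false, if_pos, List.map_cons]
      simp only [pvKeepAll, hc, Bool.false_eq_true, if_false, List.singleton_append, ← htake]
      congr 1
      exact pv_foldB ordered xs (k + 1) hxs

-- ===== VERDICT (by name: the statement is the Claim_ definition above) =====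
theorem apply_skill_hierarchy_enhanced_py_spec : Claim_equal_apply_skill_hierarchy_enhanced_py := by
  intro skills _
  unfold Spec_apply_skill_hierarchy_enhanced_py
  unfold apply_skill_hierarchy_enhanced_py apply_skill_hierarchy_enhanced_py_alt
  by_cases h : skills = []
  · subst h; rfl
  · simp only [if_neg h]
    have hA := pv_foldA (PySem.List.sorted skills (fun s => PySem.Str.len s) true)
      PySem.Set.empty []
      (PySem.List.sorted_pairwise_rev skills (fun s => PySem.Str.len s))
      (by intro t; simp [PySem.Set.empty])
      (by intro s hs; simp at hs)
    have hB := pv_foldB (PySem.List.sorted skills (fun s => PySem.Str.len s) true)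
      (PySem.List.sorted skills (fun s => PySem.Str.len s) true) 0 (by simp)
    simp only [List.map_nil, List.nil_append] at hA
    simp only [Nat.cast_zero, List.take_zero, List.map_nil] at hB
    rw [hA, hB]
    exact pv_kk_ka _ [] [] (by intro t ht; simp at ht) (by intro t ht; simp at ht)
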